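-- pv_equiv track=rewrite | github.com/rgdevengineer/Python-Programs-Daily | My-GFG-Solutions/sum_of_length.py | sumoflength
-- ===== SOURCE A (Python) =====
-- def sumoflength(arr):
--     MOD = 10**9 + 7
--     n = len(arr)
--     seen = set()
--     left = 0
--     total_length = 0
--
--     for right in range(n):
--         while arr[right] in seen:
--             seen.remove(arr[left])
--             left += 1
--
--         seen.add(arr[right])
--
--         length = right - left + 1
--         total_length = (total_length + (length * (length + 1)) // 2) % MOD
--
--     return total_length
-- ===== SOURCE B (Python) =====
-- def sumoflength(arr):
--     MOD = 10**9 + 7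
--     last = {}
--     left = 0
--     total = 0
--     for right, x in enumerate(arr):
--         left = max(left, last.get(x, -1) + 1)
--         last[x] = right
--         length = right - left + 1
--         total = (total + length * (length + 1) // 2) % MOD
--     return total
-- ===== Notes on version B (the rewrite author's own statement) =====
-- stated objective: alternative
-- what changed: Replaces the set-plus-inner-while shrinking window with a dict of last occurrence indices: left jumps directly to max(left, last[x]+1), so there is no inner loop and no element-by-element set removal.
import Mathlib
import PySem

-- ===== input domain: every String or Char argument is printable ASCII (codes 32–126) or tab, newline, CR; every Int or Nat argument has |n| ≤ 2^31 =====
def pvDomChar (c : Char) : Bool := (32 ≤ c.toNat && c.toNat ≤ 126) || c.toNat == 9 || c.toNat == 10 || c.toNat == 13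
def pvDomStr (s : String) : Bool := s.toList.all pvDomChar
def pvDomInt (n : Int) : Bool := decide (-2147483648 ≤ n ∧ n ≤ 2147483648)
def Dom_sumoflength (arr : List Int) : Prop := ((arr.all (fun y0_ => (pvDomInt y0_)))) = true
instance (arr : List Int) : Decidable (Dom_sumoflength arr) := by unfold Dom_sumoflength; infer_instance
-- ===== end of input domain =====

-- B replaces A's set-plus-inner-while window shrinking with a last-occurrence dict so the left edge jumps directly (objective: alternative).

-- ===== PORT A =====
-- A's inner while loop: while arr[right] in seen: seen.remove(arr[left]); left += 1.
-- seen.remove raises KeyError when absent; PySem.Set.remove? returns none there and this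
-- port stops the loop (that branch is unreachable in A's executions: arr[left] is always in seen).
def pyShrink_sumoflength (arr : List Int) (r : Int) (seen : PySem.Set Int) (left : Int) :
    PySem.Set Int × Int :=
  if PySem.Set.contains seen (PySem.List.pyGetD arr r 0) then
    match h : PySem.Set.remove? seen (PySem.List.pyGetD arr left 0) with
    | some seen' => pyShrink_sumoflength arr r seen' (left + 1)
    | none => (seen, left)
  else (seen, left)
termination_by seen.length
decreasing_by
  have hv : (PySem.List.pyGetD arr left 0) ∈ seen := by
    by_contra hv
    rw [(PySem.Set.remove?_eq_none_iff seen _).mpr hv] at h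
    simp at h
  rw [PySem.Set.remove?_of_mem hv] at h
  injection h with h2
  subst h2
  simp only [PySem.Set.discard]
  exact (List.length_filter_lt_length_iff_exists).mpr ⟨_, hv, by simp⟩

def sumoflength (arr : List Int) : Int :=
  let MOD : Int := 10 ^ 9 + 7
  let n : Int := (arr.length : Int)
  ((PySem.List.pyRange 0 n 1).foldl
    (fun (st : PySem.Set Int × Int × Int) r =>
      let sl := pyShrink_sumoflength arr r st.1 st.2.1
      let seen := PySem.Set.add sl.1 (PySem.List.pyGetD arr r 0)
      let length := r - sl.2 + 1
      (seen, sl.2, PySem.Int.mod (st.2.2 + PySem.Int.floordiv (length * (length + 1)) 2) MOD))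
    (PySem.Set.empty, 0, 0)).2.2

-- ===== PORT B =====
def sumoflength_alt (arr : List Int) : Int :=
  let MOD : Int := 10 ^ 9 + 7
  ((PySem.List.enumerate arr 0).foldl
    (fun (st : PySem.Dict Int Int × Int × Int) p =>
      let left := max st.2.1 (PySem.Dict.getD st.1 p.2 (-1) + 1)
      let last := PySem.Dict.insert st.1 p.2 p.1
      let length := p.1 - left + 1
      (last, left, PySem.Int.mod (st.2.2 + PySem.Int.floordiv (length * (length + 1)) 2) MOD))
    (PySem.Dict.empty, 0, 0)).2.2

-- ===== PRECONDITION & SPEC =====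
def Spec_sumoflength (arr : List Int) (out : Int) : Prop := out = sumoflength_alt arr
instance (arr : List Int) (out : Int) : Decidable (Spec_sumoflength arr out) := by unfold Spec_sumoflength; infer_instance

-- ===== CLAIM (what is proved, stated in full; the proofs are below) =====
def Claim_equal_sumoflength : Prop := ∀ (arr : List Int), Dom_sumoflength arr → Spec_sumoflength arr (sumoflength arr)

-- ===== LEMMAS AND PROOFS =====

-- the window arr[l..k-1]
def pvWin (arr : List Int) (l k : Nat) : List Int :=
  (List.range' l (k - l)).map (fun j => arr.getD j 0)

-- last index j < k with arr[j] = v, else -1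
def pvLast (arr : List Int) : Nat → Int → Int
  | 0, _ => -1
  | k+1, v => if arr.getD k 0 = v then (k : Int) else pvLast arr k v

-- the common new left edge when processing index k from left edge l
def pvM (arr : List Int) (k l : Nat) : Nat :=
  (max (l : Int) (pvLast arr k (arr.getD k 0) + 1)).toNat

-- A's per-step function (definitionally the body of sumoflength's fold)
def pvA (arr : List Int) (st : PySem.Set Int × Int × Int) (r : Int) :
    PySem.Set Int × Int × Int :=
  (PySem.Set.add (pyShrink_sumoflength arr r st.1 st.2.1).1 (PySem.List.pyGetD arr r 0),
   (pyShrink_sumoflength arr r st.1 st.2.1).2,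
   PySem.Int.mod (st.2.2 + PySem.Int.floordiv
     ((r - (pyShrink_sumoflength arr r st.1 st.2.1).2 + 1) *
      (r - (pyShrink_sumoflength arr r st.1 st.2.1).2 + 1 + 1)) 2) (10 ^ 9 + 7))

-- B's per-step function, composed with the enumerate element (j, arr[j])
def pvB (arr : List Int) (st : PySem.Dict Int Int × Int × Int) (j : Int) :
    PySem.Dict Int Int × Int × Int :=
  (PySem.Dict.insert st.1 (PySem.List.pyGetD arr j 0) j,
   max st.2.1 (PySem.Dict.getD st.1 (PySem.List.pyGetD arr j 0) (-1) + 1),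
   PySem.Int.mod (st.2.2 + PySem.Int.floordiv
     ((j - max st.2.1 (PySem.Dict.getD st.1 (PySem.List.pyGetD arr j 0) (-1) + 1) + 1) *
      (j - max st.2.1 (PySem.Dict.getD st.1 (PySem.List.pyGetD arr j 0) (-1) + 1) + 1 + 1)) 2)
     (10 ^ 9 + 7))

theorem sumoflength_eq_fold (arr : List Int) :
    sumoflength arr =
      ((PySem.List.pyRange 0 (arr.length : Int) 1).foldl (pvA arr) (PySem.Set.empty, 0, 0)).2.2 := by
  unfold sumoflength pvA
  rfl

theorem sumoflength_alt_eq_fold (arr : List Int) :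
    sumoflength_alt arr =
      ((PySem.List.pyRange 0 (arr.length : Int) 1).foldl (pvB arr) (PySem.Dict.empty, 0, 0)).2.2 := by
  unfold sumoflength_alt pvB
  simp only [PySem.List.enumerate_eq_map_pyRange arr (0 : Int), PySem.List.len_eq,
    List.foldl_map]

theorem pvWin_nil (arr : List Int) (l k : Nat) (h : k ≤ l) : pvWin arr l k = [] := by
  simp [pvWin, Nat.sub_eq_zero_of_le h]

theorem pvWin_cons (arr : List Int) (l k : Nat) (h : l < k) :
    pvWin arr l k = arr.getD l 0 :: pvWin arr (l+1) k := by
  unfold pvWin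
  rw [show k - l = (k - (l+1)) + 1 by omega, List.range'_succ]
  simp

theorem pvWin_concat (arr : List Int) (l k : Nat) (h : l ≤ k) :
    pvWin arr l (k+1) = pvWin arr l k ++ [arr.getD k 0] := by
  unfold pvWin
  rw [show k + 1 - l = (k - l) + 1 by omega, List.range'_concat]
  simp [show l + (k - l) = k by omega]

theorem pvWin_split (arr : List Int) (l m k : Nat) (h1 : l ≤ m) (h2 : m ≤ k) :
    pvWin arr l k = pvWin arr l m ++ pvWin arr m k := by
  unfold pvWin
  rw [← List.map_append]
  congr 1
  have h := @List.range'_append l (m - l) (k - m) 1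
  simp only [one_mul] at h
  rw [show l + (m - l) = m by omega] at h
  rw [show (m - l) + (k - m) = k - l by omega] at h
  exact h.symm

theorem pvWin_mem (arr : List Int) (l k : Nat) (x : Int) :
    x ∈ pvWin arr l k ↔ ∃ j, l ≤ j ∧ j < k ∧ arr.getD j 0 = x := by
  simp only [pvWin, List.mem_map, List.mem_range'_1]
  constructor
  · rintro ⟨j, ⟨hj1, hj2⟩, hj3⟩
    exact ⟨j, hj1, by omega, hj3⟩
  · rintro ⟨j, hj1, hj2, hj3⟩
    exact ⟨j, ⟨hj1, by omega⟩, hj3⟩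

theorem pvLast_lt (arr : List Int) (k : Nat) (v : Int) : pvLast arr k v < (k : Int) := by
  induction k with
  | zero => simp [pvLast]
  | succ k ih =>
    simp only [pvLast]
    split
    · push_cast; omega
    · push_cast at ih ⊢; omega

theorem pvLast_ge_iff (arr : List Int) (k : Nat) (v : Int) (l : Nat) :
    (l : Int) ≤ pvLast arr k v ↔ ∃ j, l ≤ j ∧ j < k ∧ arr.getD j 0 = v := by
  induction k with
  | zero =>
    simp only [pvLast]
    constructor
    · intro h; omega
    · rintro ⟨j, _, hj, _⟩; omega
  | succ k ih =>
    simp only [pvLast]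
    split
    · rename_i hk
      constructor
      · intro h
        exact ⟨k, by exact_mod_cast h, by omega, hk⟩
      · rintro ⟨j, hj1, hj2, _⟩
        have h1 : (l : Int) ≤ (j : Int) := by exact_mod_cast hj1
        have h2 : (j : Int) ≤ (k : Int) := by exact_mod_cast Nat.lt_succ_iff.mp hj2
        omega
    · rename_i hk
      rw [ih]
      constructor
      · rintro ⟨j, h1, h2, h3⟩
        exact ⟨j, h1, by omega, h3⟩
      · rintro ⟨j, h1, h2, h3⟩
        refine ⟨j, h1, ?_, h3⟩
        rcases Nat.lt_succ_iff_lt_or_eq.mp h2 with h | h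
        · exact h
        · subst h; exact absurd h3 hk

theorem pvWin_mem_iff_last (arr : List Int) (l k : Nat) (x : Int) :
    x ∈ pvWin arr l k ↔ (l : Int) ≤ pvLast arr k x := by
  rw [pvWin_mem, pvLast_ge_iff]

-- the shrink loop lands exactly at pvM
theorem pvShrink_spec (arr : List Int) (k : Nat) :
    ∀ l : Nat, l ≤ k → (pvWin arr l k).Nodup →
      pyShrink_sumoflength arr (k : Int) (pvWin arr l k) (l : Int) =
        (pvWin arr (pvM arr k l) k, (pvM arr k l : Int)) := by
  have H : ∀ n l, k - l ≤ n → l ≤ k → (pvWin arr l k).Nodup →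
      pyShrink_sumoflength arr (k : Int) (pvWin arr l k) (l : Int) =
        (pvWin arr (pvM arr k l) k, (pvM arr k l : Int)) := by
    intro n
    induction n with
    | zero =>
      intro l hn hlk _
      have hkl : k ≤ l := by omega
      have hnotin : arr.getD k 0 ∉ pvWin arr l k := by
        rw [pvWin_nil arr l k hkl]; simp
      rw [pyShrink_sumoflength]
      simp only [PySem.List.pyGetD_natCast, PySem.Set.contains_eq_decide]
      rw [decide_eq_false hnotin]
      simp only [Bool.false_eq_true, if_false]
      have hle : pvLast arr k (arr.getD k 0) + 1 ≤ (l : Int) := by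
        have := (pvWin_mem_iff_last arr l k (arr.getD k 0)).not.mp hnotin
        omega
      have hm : pvM arr k l = l := by
        unfold pvM
        rw [max_eq_left hle]
        simp
      rw [hm]
    | succ n ih =>
      intro l hn hlk hnd
      by_cases hx : arr.getD k 0 ∈ pvWin arr l k
      · -- window contains arr[k]: remove arr[l] and recurse
        have hlt : l < k := by
          by_contra hc
          rw [pvWin_nil arr l k (by omega)] at hx
          simp at hx
        have hcons := pvWin_cons arr l k hlt
        have hheadmem : arr.getD l 0 ∈ pvWin arr l k := by
          rw [hcons]; exact List.mem_cons_self
        have hndtail : (pvWin arr (l+1) k).Nodup := by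
          rw [hcons] at hnd; exact hnd.of_cons
        have hheadnot : arr.getD l 0 ∉ pvWin arr (l+1) k := by
          rw [hcons] at hnd
          exact (List.nodup_cons.mp hnd).1
        have hdiscard : PySem.Set.discard (pvWin arr l k) (arr.getD l 0) = pvWin arr (l+1) k := by
          rw [hcons]
          simp only [PySem.Set.discard, List.filter_cons, beq_self_eq_true,
            Bool.not_true, Bool.false_eq_true, if_false]
          refine List.filter_eq_self.mpr ?_
          intro a ha
          have hne : a ≠ arr.getD l 0 := fun hae => hheadnot (hae ▸ ha)
          simpa [List.getD] using hne
        have hrem : PySem.Set.remove? (pvWin arr l k) (PySem.List.pyGetD arr ((l : Nat) : Int) 0) =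
            some (pvWin arr (l+1) k) := by
          rw [PySem.List.pyGetD_natCast, PySem.Set.remove?_of_mem hheadmem, hdiscard]
        rw [pyShrink_sumoflength]
        simp only [PySem.List.pyGetD_natCast, PySem.Set.contains_eq_decide]
        rw [decide_eq_true hx]
        simp only [if_true]
        have hrec := ih (l+1) (by omega) (by omega) hndtail
        have hMeq : pvM arr k l = pvM arr k (l+1) := by
          unfold pvM
          have hge : (l : Int) ≤ pvLast arr k (arr.getD k 0) :=
            (pvWin_mem_iff_last arr l k (arr.getD k 0)).mp hx
          congr 1
          push_cast
          omega
        split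
        · rename_i seen' heq
          rw [hrem] at heq
          injection heq with heq2
          subst heq2
          rw [show (l : Int) + 1 = ((l + 1 : Nat) : Int) by push_cast; ring]
          rw [hrec, hMeq]
        · rename_i heq
          rw [hrem] at heq
          simp at heq
      · -- window does not contain arr[k]: loop exits at once
        rw [pyShrink_sumoflength]
        simp only [PySem.List.pyGetD_natCast, PySem.Set.contains_eq_decide]
        rw [decide_eq_false hx]
        simp only [Bool.false_eq_true, if_false]
        have hle : pvLast arr k (arr.getD k 0) + 1 ≤ (l : Int) := by
          have := (pvWin_mem_iff_last arr l k (arr.getD k 0)).not.mp hx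
          omega
        have hm : pvM arr k l = l := by
          unfold pvM
          rw [max_eq_left hle]
          simp
        rw [hm]
  intro l hlk hnd
  exact H (k - l) l le_rfl hlk hnd

-- joint loop invariant for the two folds over indices 0..k-1
theorem pvMain (arr : List Int) : ∀ k, k ≤ arr.length →
    ∃ (l : Nat) (t : Int) (last : PySem.Dict Int Int),
      l ≤ k ∧ (pvWin arr l k).Nodup ∧
      (∀ v, last.getD v (-1) = pvLast arr k v) ∧
      (PySem.List.pyRange 0 (k : Int) 1).foldl (pvA arr) (PySem.Set.empty, 0, 0) =
        (pvWin arr l k, (l : Int), t) ∧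
      (PySem.List.pyRange 0 (k : Int) 1).foldl (pvB arr) (PySem.Dict.empty, 0, 0) =
        (last, (l : Int), t) := by
  intro k
  induction k with
  | zero =>
    intro _
    have hr : PySem.List.pyRange 0 ((0 : Nat) : Int) 1 = [] := by
      simp [pysem]
    refine ⟨0, 0, PySem.Dict.empty, le_rfl, ?_, ?_, ?_, ?_⟩
    · simp [pvWin]
    · intro v; simp [pvLast]
    · rw [hr]; simp [pvWin, PySem.Set.empty]
    · rw [hr]; simp
  | succ k ih =>
    intro hk
    obtain ⟨l, t, last, hlk, hnd, hlast, hA, hB⟩ := ih (by omega)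
    have hplt : pvLast arr k (arr.getD k 0) < (k : Int) := pvLast_lt arr k (arr.getD k 0)
    set m := pvM arr k l with hmdef
    have hmInt : (m : Int) = max (l : Int) (pvLast arr k (arr.getD k 0) + 1) := by
      rw [hmdef]; unfold pvM
      rw [Int.toNat_of_nonneg (le_trans (Int.natCast_nonneg l) (le_max_left _ _))]
    have hml : l ≤ m := by
      have : (l : Int) ≤ (m : Int) := by rw [hmInt]; exact le_max_left _ _
      exact_mod_cast this
    have hmk : m ≤ k := by
      have hlkI : (l : Int) ≤ (k : Int) := by exact_mod_cast hlk
      have : (m : Int) ≤ (k : Int) := by rw [hmInt]; omega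
      exact_mod_cast this
    have hxnot : arr.getD k 0 ∉ pvWin arr m k := by
      rw [pvWin_mem_iff_last]
      rw [hmInt]
      omega
    have hndm : (pvWin arr m k).Nodup := by
      rw [pvWin_split arr l m k hml hmk] at hnd
      exact hnd.of_append_right
    have hndnew : (pvWin arr m (k+1)).Nodup := by
      rw [pvWin_concat arr m k hmk]
      refine List.Nodup.append hndm (List.nodup_singleton _) ?_
      rw [List.disjoint_singleton]
      exact hxnot
    have hrange : PySem.List.pyRange 0 ((k + 1 : Nat) : Int) 1 =
        PySem.List.pyRange 0 (k : Int) 1 ++ [(k : Int)] := by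
      push_cast
      exact PySem.List.pyRange_one_succ_right (Int.natCast_nonneg k)
    have hshr : pyShrink_sumoflength arr (k : Int) (pvWin arr l k) (l : Int) =
        (pvWin arr m k, (m : Int)) := pvShrink_spec arr k l hlk hnd
    have hstepA : pvA arr (pvWin arr l k, (l : Int), t) (k : Int) =
        (pvWin arr m (k+1), (m : Int),
         PySem.Int.mod (t + PySem.Int.floordiv
           (((k : Int) - (m : Int) + 1) * ((k : Int) - (m : Int) + 1 + 1)) 2) (10 ^ 9 + 7)) := by
      simp only [pvA, hshr, PySem.List.pyGetD_natCast]
      rw [PySem.Set.add_of_not_mem hxnot, ← pvWin_concat arr m k hmk]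
    have hleft : max (l : Int) (PySem.Dict.getD last (arr.getD k 0) (-1) + 1) = (m : Int) := by
      rw [hlast (arr.getD k 0), hmInt]
    have hstepB : pvB arr (last, (l : Int), t) (k : Int) =
        (PySem.Dict.insert last (arr.getD k 0) (k : Int), (m : Int),
         PySem.Int.mod (t + PySem.Int.floordiv
           (((k : Int) - (m : Int) + 1) * ((k : Int) - (m : Int) + 1 + 1)) 2) (10 ^ 9 + 7)) := by
      simp only [pvB, PySem.List.pyGetD_natCast]
      rw [hleft]
    refine ⟨m, PySem.Int.mod (t + PySem.Int.floordiv
        (((k : Int) - (m : Int) + 1) * ((k : Int) - (m : Int) + 1 + 1)) 2) (10 ^ 9 + 7),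
      PySem.Dict.insert last (arr.getD k 0) (k : Int), by omega, hndnew, ?_, ?_, ?_⟩
    · intro v
      rw [PySem.Dict.getD_insert]
      simp only [pvLast]
      by_cases hv : v = arr.getD k 0
      · rw [if_pos hv, if_pos hv.symm]
      · rw [if_neg hv, if_neg (fun h => hv h.symm), hlast v]
    · rw [hrange, List.foldl_append, hA]
      simp only [List.foldl_cons, List.foldl_nil]
      exact hstepA
    · rw [hrange, List.foldl_append, hB]
      simp only [List.foldl_cons, List.foldl_nil]
      exact hstepB

-- ===== VERDICT (by name: the statement is the Claim_ definition above) =====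
theorem sumoflength_spec : Claim_equal_sumoflength := by
  intro arr _
  unfold Spec_sumoflength
  obtain ⟨l, t, last, _, _, _, hA, hB⟩ := pvMain arr arr.length le_rfl
  rw [sumoflength_eq_fold, sumoflength_alt_eq_fold, hA, hB]
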